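-- pv_equiv track=rewrite | github.com/AniketWagh2001/AI-AND-CD | AI Assignments/AI Assignments/ai/Ass5/crossword.py | get_down_slots
-- ===== SOURCE A (Python) =====
-- def check_right(i, j, grid) -> tuple[int, int, int]:
--     counter = 0
--     while (counter + j) < len(grid[i]):
--         if grid[i][j + counter] == ' ':
--             counter += 1
--         else:
--             break
--     if counter < 2:
--         return None
--     else:
--         return (i, j, counter)
--
-- def get_across_slots(grid: list[str]):
--     accross_slots = []
--     i = 0
--     while i < len(grid):
--         j = 0
--         while j < len(grid[i]):
--             if grid[i][j] == ' ':
--                 if slot := check_right(i, j, grid):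
--                     accross_slots.append(slot)
--                     j += slot[2]
--             j += 1
--         i += 1
--     return accross_slots
--
-- def get_down_slots(grid: list[str]):
--     t_grid = []
--     for i in range(len(grid)):
--         string = ''.join([row[i] for row in grid])
--         t_grid.append(string)
--     down_slots = get_across_slots(t_grid)
--     down_slots = [(slot[1], slot[0], slot[2]) for slot in down_slots]
--     return down_slots
-- ===== SOURCE B (Python) =====
-- def get_down_slots(grid: list[str]):
--     # Direct column scan: no transposed table; one pass per column tracking the
--     # current run of spaces. Columns iterate over range(len(grid)) as A does.
--     slots = []
--     n = len(grid)
--     for c in range(n):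
--         start = 0
--         run = 0
--         for r in range(n):
--             if grid[r][c] == ' ':
--                 if run == 0:
--                     start = r
--                 run += 1
--             else:
--                 if run >= 2:
--                     slots.append((start, c, run))
--                 run = 0
--         if run >= 2:
--             slots.append((start, c, run))
--     return slots
-- ===== Notes on version B (the rewrite author's own statement) =====
-- stated objective: simpler
-- what changed: A builds a transposed copy of the grid and reuses the across-slot scanner (check_right rescans each run) on it, then swaps coordinates; B scans each column directly with a single run-length accumulator pass and no intermediate table or rescanning.
import Mathlib
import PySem

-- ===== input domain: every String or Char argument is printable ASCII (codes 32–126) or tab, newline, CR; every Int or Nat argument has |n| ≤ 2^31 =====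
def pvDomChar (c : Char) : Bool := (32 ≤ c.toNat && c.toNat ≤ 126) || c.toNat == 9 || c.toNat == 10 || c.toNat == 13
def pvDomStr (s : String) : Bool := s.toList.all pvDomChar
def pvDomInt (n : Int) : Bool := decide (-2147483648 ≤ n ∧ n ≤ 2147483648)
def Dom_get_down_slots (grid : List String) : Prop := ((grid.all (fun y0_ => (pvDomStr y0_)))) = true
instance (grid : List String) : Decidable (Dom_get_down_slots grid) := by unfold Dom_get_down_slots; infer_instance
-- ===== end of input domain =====

-- B replaces A's transpose-then-reuse-the-across-scanner with a single direct
-- per-column run-length scan (no intermediate transposed table); objective: simpler.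


-- ===== PORT A =====
-- check_right's while loop (fuel = row.length+1 bounds its ≤ row.length-j iterations)
def pvCRLoop (row : List Char) (j counter fuel : Nat) : Nat :=
  match fuel with
  | 0 => counter
  | f + 1 =>
    if counter + j < row.length then
      if row.getD (j + counter) ' ' = ' ' then pvCRLoop row j (counter + 1) f
      else counter
    else counter

def pvCheckRight (i j : Nat) (grid : List (List Char)) : Option (Int × Int × Int) :=
  let row := grid.getD i []
  let counter := pvCRLoop row j 0 (row.length + 1)
  if counter < 2 then none else some ((i : Int), (j : Int), (counter : Int))

-- inner while loop of get_across_slots (j advances ≥ 1 each iteration)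
def pvGASInner (i : Nat) (grid : List (List Char)) (j : Nat)
    (acc : List (Int × Int × Int)) (fuel : Nat) : List (Int × Int × Int) :=
  match fuel with
  | 0 => acc
  | f + 1 =>
    if j < (grid.getD i []).length then
      if (grid.getD i []).getD j ' ' = ' ' then
        match pvCheckRight i j grid with
        | some slot => pvGASInner i grid (j + slot.2.2.toNat + 1) (acc ++ [slot]) f
        | none => pvGASInner i grid (j + 1) acc f
      else pvGASInner i grid (j + 1) acc f
    else acc

-- outer while loop of get_across_slots
def pvGASOuter (grid : List (List Char)) (i : Nat)
    (acc : List (Int × Int × Int)) (fuel : Nat) : List (Int × Int × Int) :=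
  match fuel with
  | 0 => acc
  | f + 1 =>
    if i < grid.length then
      pvGASOuter grid (i + 1) (pvGASInner i grid 0 acc ((grid.getD i []).length + 1)) f
    else acc

def get_across_slots_port (grid : List (List Char)) : List (Int × Int × Int) :=
  pvGASOuter grid 0 [] grid.length

def get_down_slots (grid : List String) : List (Int × Int × Int) :=
  let tg := (List.range grid.length).map
    (fun i => grid.map (fun row => row.toList.getD i ' '))
  (get_across_slots_port tg).map (fun s => (s.2.1, s.1, s.2.2))

-- ===== PORT B =====
def get_down_slots_alt (grid : List String) : List (Int × Int × Int) :=
  let rows := grid.map String.toList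
  let n := grid.length
  (List.range n).foldl (fun slots c =>
    let st := (List.range n).foldl (fun (p : Nat × Nat × List (Int × Int × Int)) r =>
      let (start, run, slots) := p
      if (rows.getD r []).getD c ' ' = ' ' then
        (if run = 0 then r else start, run + 1, slots)
      else
        (start, 0, if 2 ≤ run then slots ++ [((start : Int), (c : Int), (run : Int))] else slots))
      (0, 0, slots)
    if 2 ≤ st.2.1 then st.2.2 ++ [((st.1 : Int), (c : Int), (st.2.1 : Int))] else st.2.2) []

-- ===== PRECONDITION & SPEC =====
-- Pre_ excludes ragged grids (some row shorter than the row count): there the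
-- Python A raises IndexError (row[i] in the transpose), and B raises too.
def Pre_get_down_slots (grid : List String) : Prop :=
  ∀ s ∈ grid, grid.length ≤ s.toList.length
instance (grid : List String) : Decidable (Pre_get_down_slots grid) := by
  unfold Pre_get_down_slots; infer_instance

def pvWitness_get_down_slots : List String := ["a  ", "b x", "c  "]

def Spec_get_down_slots (grid : List String) (out : List (Int × Int × Int)) : Prop := out = get_down_slots_alt grid
instance (grid : List String) (out : List (Int × Int × Int)) : Decidable (Spec_get_down_slots grid out) := by unfold Spec_get_down_slots; infer_instance

-- ===== CLAIM (what is proved, stated in full; the proofs are below) =====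
def Claim_equal_get_down_slots : Prop := ∀ (grid : List String), Dom_get_down_slots grid → Pre_get_down_slots grid → Spec_get_down_slots grid (get_down_slots grid)

-- ===== LEMMAS AND PROOFS =====

-- reference: length of the leading run of spaces
def pvW (l : List Char) : Nat := (l.takeWhile (fun c => c = ' ')).length

-- reference: the maximal space-runs of length ≥ 2 in l, with absolute start positions
def pvS : List Char → Nat → List (Nat × Nat)
  | [], _ => []
  | c :: t, r =>
    if c = ' ' then
      if 2 ≤ 1 + pvW t then (r, 1 + pvW t) :: pvS (t.drop (pvW t)) (r + 1 + pvW t)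
      else pvS t (r + 1)
    else pvS t (r + 1)
termination_by l => l.length
decreasing_by
  · simpa using Nat.lt_succ_of_le (List.length_drop_le _ _)
  · simp
  · simp

lemma pvW_nil : pvW [] = 0 := rfl

lemma pvS_nil (r : Nat) : pvS [] r = [] := by rw [pvS]

lemma pvS_cons (c : Char) (t : List Char) (r : Nat) :
    pvS (c :: t) r =
      if c = ' ' then
        if 2 ≤ 1 + pvW t then (r, 1 + pvW t) :: pvS (t.drop (pvW t)) (r + 1 + pvW t)
        else pvS t (r + 1)
      else pvS t (r + 1) := by rw [pvS]

lemma pvW_cons (c : Char) (t : List Char) :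
    pvW (c :: t) = if c = ' ' then 1 + pvW t else 0 := by
  simp [pvW, List.takeWhile_cons]; split_ifs <;> simp [Nat.add_comm]

lemma pvW_replicate (n : Nat) : pvW (List.replicate n ' ') = n := by
  induction n with
  | zero => rfl
  | succ n ih => simp [List.replicate_succ, pvW_cons, ih, Nat.add_comm]

lemma pvW_replicate_append (n : Nat) (c : Char) (t : List Char) (hc : c ≠ ' ') :
    pvW (List.replicate n ' ' ++ c :: t) = n := by
  induction n with
  | zero => simp [pvW_cons, hc]
  | succ n ih => simp [List.replicate_succ, pvW_cons, ih, Nat.add_comm]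

lemma pvRepl_shift (n : Nat) (t : List Char) :
    List.replicate n ' ' ++ ' ' :: t = List.replicate (n + 1) ' ' ++ t := by
  simp [List.replicate_succ']

lemma pvS_run_nil (run start : Nat) (hr : 1 ≤ run) :
    pvS (List.replicate run ' ') start = if 2 ≤ run then [(start, run)] else [] := by
  obtain ⟨m, rfl⟩ := Nat.exists_eq_add_of_le hr
  rw [Nat.add_comm 1 m, List.replicate_succ, pvS_cons, if_pos rfl, pvW_replicate]
  by_cases h : 2 ≤ 1 + m
  · rw [if_pos h, if_pos (by omega)]
    have hd : (List.replicate m ' ').drop m = [] := by simp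
    rw [hd, pvS_nil]
    simp [Nat.add_comm]
  · rw [if_neg h, if_neg (by omega)]
    obtain rfl : m = 0 := by omega
    simp [pvS_nil]

lemma pvS_run (run start : Nat) (c : Char) (t : List Char) (hr : 1 ≤ run) (hc : c ≠ ' ') :
    pvS (List.replicate run ' ' ++ c :: t) start =
      (if 2 ≤ run then [(start, run)] else []) ++ pvS t (start + run + 1) := by
  obtain ⟨m, rfl⟩ := Nat.exists_eq_add_of_le hr
  rw [Nat.add_comm 1 m, List.replicate_succ, List.cons_append, pvS_cons, if_pos rfl,
    pvW_replicate_append m c t hc]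
  have hdrop : (List.replicate m ' ' ++ c :: t).drop m = c :: t := by
    simpa using List.drop_left' (l₁ := List.replicate m ' ') (l₂ := c :: t) (by simp)
  by_cases h : 2 ≤ 1 + m
  · rw [if_pos h, if_pos (by omega), hdrop, pvS_cons, if_neg hc]
    have e1 : 1 + m = m + 1 := by omega
    have e2 : start + 1 + m + 1 = start + (m + 1) + 1 := by omega
    rw [e1, e2, List.singleton_append]
  · rw [if_neg h, if_neg (by omega)]
    obtain rfl : m = 0 := by omega
    simp only [List.replicate, List.nil_append]
    rw [pvS_cons, if_neg hc]

lemma pvW_getElem_ne (l : List Char) (h : pvW l < l.length) : l[pvW l]'h ≠ ' ' := by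
  induction l with
  | nil => simp at h
  | cons c t ih =>
    by_cases hc : c = ' '
    · have hw : pvW (c :: t) = 1 + pvW t := by simp [pvW_cons, hc]
      have h' : pvW t < t.length := by simp [hw] at h; omega
      have := ih h'
      simp only [hw] at *
      simpa [Nat.add_comm 1 (pvW t), List.getElem_cons_succ] using this
    · simp only [pvW_cons, if_neg hc]
      simpa using hc

-- ==== A side ====

lemma pvCRLoop_eq (row : List Char) (j : Nat) :
    ∀ fuel counter, row.length ≤ j + counter + fuel →
      pvCRLoop row j counter fuel = counter + pvW (row.drop (j + counter)) := by
  intro fuel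
  induction fuel with
  | zero =>
    intro counter h
    have : row.drop (j + counter) = [] := List.drop_eq_nil_of_le (by omega)
    simp [pvCRLoop, this, pvW_nil]
  | succ f ih =>
    intro counter h
    rw [pvCRLoop]
    by_cases hlt : counter + j < row.length
    · have hj : j + counter < row.length := by omega
      have hdrop : row.drop (j + counter) = row[j + counter] :: row.drop (j + counter + 1) :=
        List.drop_eq_getElem_cons hj
      have hget : row.getD (j + counter) ' ' = row[j + counter] := List.getD_eq_getElem row ' ' hj
      by_cases hsp : row[j + counter] = ' '
      · rw [if_pos hlt, hget, if_pos hsp]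
        rw [ih (counter + 1) (by omega)]
        rw [hdrop, pvW_cons, if_pos hsp]
        have : j + (counter + 1) = j + counter + 1 := by omega
        rw [this]; omega
      · rw [if_pos hlt, hget, if_neg hsp, hdrop, pvW_cons, if_neg hsp]
        omega
    · have : row.drop (j + counter) = [] := List.drop_eq_nil_of_le (by omega)
      rw [if_neg hlt, this, pvW_nil]
      omega

lemma pvGASInner_eq (grid : List (List Char)) (i : Nat) :
    ∀ fuel j acc, (grid.getD i []).length < j + fuel →
      pvGASInner i grid j acc fuel =
        acc ++ (pvS ((grid.getD i []).drop j) j).map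
          (fun p => ((i : Int), (p.1 : Int), (p.2 : Int))) := by
  intro fuel
  induction fuel with
  | zero =>
    intro j acc h
    have hd : (grid.getD i []).drop j = [] := List.drop_eq_nil_of_le (by omega)
    rw [hd, pvS_nil]
    simp [pvGASInner]
  | succ f ih =>
    intro j acc h
    set col := grid.getD i [] with hcol
    rw [pvGASInner]
    by_cases hj : j < col.length
    · have hdrop : col.drop j = col[j] :: col.drop (j + 1) := List.drop_eq_getElem_cons hj
      have hget : col.getD j ' ' = col[j] := List.getD_eq_getElem col ' ' hj
      have hcr : pvCRLoop col j 0 (col.length + 1) = pvW (col.drop j) := by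
        have := pvCRLoop_eq col j (col.length + 1) 0 (by omega)
        simpa using this
      by_cases hsp : col[j] = ' '
      · have hw1 : pvW (col.drop j) = 1 + pvW (col.drop (j + 1)) := by
          rw [hdrop, pvW_cons, if_pos hsp]
        set k := pvW (col.drop j) with hk
        have hk1 : 1 ≤ k := by omega
        rw [if_pos hj, hget, if_pos hsp]
        have hS : pvS (col.drop (j + k)) (j + k) = pvS (col.drop (j + k + 1)) (j + k + 1) := by
          by_cases hjk : j + k < col.length
          · have hdrop2 : col.drop (j + k) = col[j + k] :: col.drop (j + k + 1) :=
              List.drop_eq_getElem_cons hjk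
            have hne : col[j + k] ≠ ' ' := by
              have hwlt : pvW (col.drop j) < (col.drop j).length := by
                rw [List.length_drop]; omega
              have h0 := pvW_getElem_ne (col.drop j) hwlt
              rw [List.getElem_drop] at h0
              exact h0
            rw [hdrop2, pvS_cons, if_neg hne]
          · have e1 : col.drop (j + k) = [] := List.drop_eq_nil_of_le (by omega)
            have e2 : col.drop (j + k + 1) = [] := List.drop_eq_nil_of_le (by omega)
            rw [e1, e2, pvS_nil, pvS_nil]
        have hweq : pvW (col.drop (j + 1)) = k - 1 := by omega
        by_cases h2 : 2 ≤ k
        · have hrhs : pvS (col.drop j) j = (j, k) :: pvS (col.drop (j + k + 1)) (j + k + 1) := by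
            rw [hdrop, pvS_cons, if_pos hsp, hweq]
            have e1 : 1 + (k - 1) = k := by omega
            rw [e1, if_pos h2]
            have hdd : (col.drop (j + 1)).drop (k - 1) = col.drop (j + k) := by
              rw [List.drop_drop]
              congr 1
              omega
            have e2 : j + 1 + (k - 1) = j + k := by omega
            rw [hdd, e2, hS]
          have hcrv : pvCheckRight i j grid = some ((i : Int), (j : Int), (k : Int)) := by
            unfold pvCheckRight
            simp only [← hcol, hcr]
            rw [if_neg (by omega)]
          rw [hcrv]
          have hred : (match some ((i : Int), (j : Int), (k : Int)) with
              | some slot => pvGASInner i grid (j + slot.2.2.toNat + 1) (acc ++ [slot]) f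
              | none => pvGASInner i grid (j + 1) acc f)
              = pvGASInner i grid (j + (k : Int).toNat + 1) (acc ++ [((i : Int), (j : Int), (k : Int))]) f := rfl
          rw [hred]
          simp only [Int.toNat_natCast]
          rw [ih (j + k + 1) (acc ++ [((i : Int), (j : Int), (k : Int))]) (by omega)]
          rw [hrhs]
          simp
        · have hk1' : k = 1 := by omega
          have hrhs : pvS (col.drop j) j = pvS (col.drop (j + 1)) (j + 1) := by
            rw [hdrop, pvS_cons, if_pos hsp, hweq]
            have e1 : 1 + (k - 1) = k := by omega
            rw [e1, if_neg h2]
          have hcrv : pvCheckRight i j grid = none := by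
            unfold pvCheckRight
            simp only [← hcol, hcr]
            rw [if_pos (by omega)]
          rw [hcrv]
          have hred : (match (none : Option (Int × Int × Int)) with
              | some slot => pvGASInner i grid (j + slot.2.2.toNat + 1) (acc ++ [slot]) f
              | none => pvGASInner i grid (j + 1) acc f)
              = pvGASInner i grid (j + 1) acc f := rfl
          rw [hred]
          rw [ih (j + 1) acc (by omega)]
          rw [hrhs]
      · rw [if_pos hj, hget, if_neg hsp]
        rw [ih (j + 1) acc (by omega)]
        rw [hdrop, pvS_cons, if_neg hsp]
    · have hd : col.drop j = [] := List.drop_eq_nil_of_le (by omega)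
      rw [if_neg hj, hd, pvS_nil]
      simp

lemma pvGASOuter_eq (grid : List (List Char)) :
    ∀ fuel idx acc, grid.length ≤ idx + fuel →
      pvGASOuter grid idx acc fuel =
        acc ++ (List.range' idx (grid.length - idx)).flatMap
          (fun i => (pvS (grid.getD i []) 0).map
            (fun p => ((i : Int), (p.1 : Int), (p.2 : Int)))) := by
  intro fuel
  induction fuel with
  | zero =>
    intro idx acc h
    have : grid.length - idx = 0 := by omega
    simp [pvGASOuter, this]
  | succ f ih =>
    intro idx acc h
    rw [pvGASOuter]
    by_cases hi : idx < grid.length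
    · rw [if_pos hi]
      rw [pvGASInner_eq grid idx _ 0 acc (by omega)]
      rw [ih (idx + 1) _ (by omega)]
      have : grid.length - idx = (grid.length - (idx + 1)) + 1 := by omega
      rw [this, List.range'_succ]
      simp [List.append_assoc]
    · rw [if_neg hi]
      have : grid.length - idx = 0 := by omega
      simp [this]

-- ==== B side ====

-- structural version of B's per-column fold state machine
def pvF (c : Nat) : List Char → Nat → Nat → Nat → List (Int × Int × Int) → Nat × Nat × List (Int × Int × Int)
  | [], _, start, run, acc => (start, run, acc)
  | ch :: t, r, start, run, acc =>
    if ch = ' ' then pvF c t (r + 1) (if run = 0 then r else start) (run + 1) acc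
    else pvF c t (r + 1) start 0
      (if 2 ≤ run then acc ++ [((start : Int), (c : Int), (run : Int))] else acc)

def pvFin (c : Nat) (st : Nat × Nat × List (Int × Int × Int)) : List (Int × Int × Int) :=
  if 2 ≤ st.2.1 then st.2.2 ++ [((st.1 : Int), (c : Int), (st.2.1 : Int))] else st.2.2

lemma pvF_spec (c : Nat) :
    ∀ (l : List Char) (r start run : Nat) (acc : List (Int × Int × Int)),
      (run = 0 ∨ r = start + run) →
      pvFin c (pvF c l r start run acc) =
        acc ++ (pvS (List.replicate run ' ' ++ l) (if run = 0 then r else start)).map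
          (fun p => ((p.1 : Int), (c : Int), (p.2 : Int))) := by
  intro l
  induction l with
  | nil =>
    intro r start run acc hinv
    rcases hinv with h0 | hr
    · subst h0; simp [pvF, pvFin, pvS]
    · rcases Nat.eq_zero_or_pos run with h0 | hpos
      · subst h0; simp [pvF, pvFin, pvS]
      · rw [List.append_nil, if_neg (by omega), pvS_run_nil run start hpos]
        simp only [pvF, pvFin]
        split_ifs with h2 <;> simp
  | cons ch t ih =>
    intro r start run acc hinv
    by_cases hsp : ch = ' '
    · subst hsp
      rw [pvF, if_pos rfl]
      rw [ih (r + 1) (if run = 0 then r else start) (run + 1) acc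
        (Or.inr (by rcases hinv with h0 | hr <;> split_ifs <;> omega))]
      rw [pvRepl_shift]
      have : (if run + 1 = 0 then r + 1 else if run = 0 then r else start)
           = (if run = 0 then r else start) := by simp
      rw [this]
    · rw [pvF, if_neg hsp]
      rw [ih (r + 1) start 0 _ (Or.inl rfl)]
      rcases Nat.eq_zero_or_pos run with h0 | hpos
      · subst h0
        simp only [List.replicate, List.nil_append]
        rw [pvS, if_neg hsp]
        simp
      · rcases hinv with h0 | hr
        · omega
        · have hne0 : ¬ run = 0 := by omega
          simp only [List.replicate, List.nil_append, reduceIte]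
          rw [if_neg hne0, pvS_run run start ch t hpos hsp, ← hr]
          split_ifs with h2 <;> simp [List.append_assoc]


-- the column c of the grid, as A's transpose builds it (short rows padded, unreachable inside Pre_)
def pvCol (grid : List String) (c : Nat) : List Char :=
  grid.map (fun row => row.toList.getD c ' ')

-- B's inner loop body, with the column access written through pvCol
def pvStep (grid : List String) (c : Nat) (p : Nat × Nat × List (Int × Int × Int)) (r : Nat) :
    Nat × Nat × List (Int × Int × Int) :=
  match p with
  | (start, run, slots) =>
    if (pvCol grid c).getD r ' ' = ' ' then (if run = 0 then r else start, run + 1, slots)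
    else (start, 0, if 2 ≤ run then slots ++ [((start : Int), (c : Int), (run : Int))] else slots)

lemma pvAccess (grid : List String) (c r : Nat) :
    ((grid.map String.toList).getD r []).getD c ' ' = (pvCol grid c).getD r ' ' := by
  by_cases hr : r < grid.length
  · have h1 : (grid.map String.toList).getD r [] = (grid[r]'hr).toList := by
      rw [List.getD_eq_getElem _ _ (by simpa using hr)]
      simp
    have h2 : (pvCol grid c).getD r ' ' = (grid[r]'hr).toList.getD c ' ' := by
      rw [List.getD_eq_getElem _ _ (by simp [pvCol]; omega)]
      simp [pvCol]
    rw [h1, h2]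
  · have h1 : (grid.map String.toList).getD r [] = [] :=
      List.getD_eq_default _ _ (by simpa using not_lt.mp hr)
    have h2 : (pvCol grid c).getD r ' ' = ' ' :=
      List.getD_eq_default _ _ (by simp [pvCol]; omega)
    rw [h1, h2]
    simp

lemma pvAlt_eq (grid : List String) :
    get_down_slots_alt grid =
      (List.range grid.length).foldl (fun slots c =>
        pvFin c ((List.range grid.length).foldl (pvStep grid c) (0, 0, slots))) [] := by
  have hfun : (fun (slots : List (Int × Int × Int)) (c : Nat) =>
      let st := (List.range grid.length).foldl
        (fun (p : Nat × Nat × List (Int × Int × Int)) r =>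
          let (start, run, slots) := p
          if ((grid.map String.toList).getD r []).getD c ' ' = ' ' then
            (if run = 0 then r else start, run + 1, slots)
          else
            (start, 0, if 2 ≤ run then slots ++ [((start : Int), (c : Int), (run : Int))] else slots))
        (0, 0, slots)
      if 2 ≤ st.2.1 then st.2.2 ++ [((st.1 : Int), (c : Int), (st.2.1 : Int))] else st.2.2)
      = (fun slots c => pvFin c ((List.range grid.length).foldl (pvStep grid c) (0, 0, slots))) := by
    funext slots c
    have hstep : (fun (p : Nat × Nat × List (Int × Int × Int)) r =>
        let (start, run, slots) := p
        if ((grid.map String.toList).getD r []).getD c ' ' = ' ' then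
          (if run = 0 then r else start, run + 1, slots)
        else
          (start, 0, if 2 ≤ run then slots ++ [((start : Int), (c : Int), (run : Int))] else slots))
        = pvStep grid c := by
      funext p r
      rcases p with ⟨start, run, sl⟩
      simp only [pvStep, pvAccess]
    rw [hstep]
    rfl
  exact congrArg (fun f => List.foldl f ([] : List (Int × Int × Int)) (List.range grid.length)) hfun

-- the inner fold over range' equals pvF on the column list
lemma pvB_inner (grid : List String) (c : Nat) :
    ∀ (m j : Nat) (s k : Nat) (a : List (Int × Int × Int)), j + m = grid.length →
      (List.range' j m).foldl (pvStep grid c) (s, k, a)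
        = pvF c ((pvCol grid c).drop j) j s k a := by
  intro m
  induction m with
  | zero =>
    intro j s k a h
    have hd : (pvCol grid c).drop j = [] :=
      List.drop_eq_nil_of_le (by simp [pvCol]; omega)
    rw [hd]
    simp [pvF]
  | succ m ih =>
    intro j s k a h
    have hj : j < (pvCol grid c).length := by simp [pvCol]; omega
    have hdrop : (pvCol grid c).drop j = (pvCol grid c)[j] :: (pvCol grid c).drop (j + 1) :=
      List.drop_eq_getElem_cons hj
    have hget : (pvCol grid c).getD j ' ' = (pvCol grid c)[j] := List.getD_eq_getElem _ ' ' hj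
    rw [List.range'_succ, List.foldl_cons, hdrop, pvF]
    show List.foldl (pvStep grid c) (pvStep grid c (s, k, a) j) (List.range' (j + 1) m) = _
    rw [pvStep]
    simp only [hget]
    by_cases hsp : (pvCol grid c)[j] = ' '
    · rw [if_pos hsp, if_pos hsp]
      exact ih (j + 1) _ _ _ (by omega)
    · rw [if_neg hsp, if_neg hsp]
      exact ih (j + 1) _ _ _ (by omega)

-- the outer fold over columns accumulates per-column results
lemma pvB_outer (grid : List String) :
    ∀ (m j : Nat) (acc : List (Int × Int × Int)), j + m = grid.length →
      (List.range' j m).foldl (fun slots c =>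
        pvFin c ((List.range' 0 grid.length).foldl (pvStep grid c) (0, 0, slots))) acc
      = acc ++ (List.range' j m).flatMap
          (fun c => (pvS (pvCol grid c) 0).map
            (fun p => ((p.1 : Int), (c : Int), (p.2 : Int)))) := by
  intro m
  induction m with
  | zero => intro j acc h; simp
  | succ m ih =>
    intro j acc h
    rw [List.range'_succ, List.foldl_cons, List.flatMap_cons]
    have hone : pvFin j ((List.range' 0 grid.length).foldl (pvStep grid j) (0, 0, acc))
        = acc ++ (pvS (pvCol grid j) 0).map
            (fun p => ((p.1 : Int), (j : Int), (p.2 : Int))) := by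
      rw [pvB_inner grid j grid.length 0 0 0 acc (by omega)]
      simp only [List.drop_zero]
      have := pvF_spec j (pvCol grid j) 0 0 0 acc (Or.inl rfl)
      simpa using this
    rw [hone, ih (j + 1) _ (by omega)]
    simp [List.append_assoc]

-- ==== assembly ====

lemma tg_getD (grid : List String) (i : Nat) (hi : i < grid.length) :
    ((List.range grid.length).map
      (fun i => grid.map (fun row => row.toList.getD i ' '))).getD i []
    = pvCol grid i := by
  rw [List.getD_eq_getElem _ _ (by simpa using hi)]
  simp [pvCol]

lemma get_down_slots_eq (grid : List String) :
    get_down_slots grid = (List.range' 0 grid.length).flatMap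
      (fun i => (pvS (pvCol grid i) 0).map
        (fun p => ((p.1 : Int), (i : Int), (p.2 : Int)))) := by
  show (get_across_slots_port ((List.range grid.length).map
      (fun i => grid.map (fun row => row.toList.getD i ' ')))).map
      (fun s => (s.2.1, s.1, s.2.2)) = _
  set tg := (List.range grid.length).map
    (fun i => grid.map (fun row => row.toList.getD i ' ')) with htg
  have hlen : tg.length = grid.length := by simp [htg]
  unfold get_across_slots_port
  rw [pvGASOuter_eq tg tg.length 0 [] (by omega)]
  simp only [Nat.sub_zero, List.nil_append, hlen]
  rw [List.map_flatMap]
  apply List.flatMap_congr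
  intro i hi
  have hi' : i < grid.length := by
    have := List.mem_range'.mp hi
    omega
  have hcol : tg.getD i [] = pvCol grid i := by
    rw [htg]
    exact tg_getD grid i hi'
  rw [hcol, List.map_map]
  rfl

-- ===== VERDICT (by name: the statement is the Claim_ definition above) =====
theorem get_down_slots_spec : Claim_equal_get_down_slots := by
  intro grid _dom _pre
  unfold Spec_get_down_slots
  rw [get_down_slots_eq, pvAlt_eq]
  rw [List.range_eq_range']
  rw [pvB_outer grid grid.length 0 [] (by omega)]
  simp
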